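-- pv_equiv track=rewrite | github.com/jpgelas/queens | queens.py | isUpperLeftAndRightDiagonalsAvailable
-- ===== SOURCE A (Python) =====
-- CHESSBOARD_SIZE = 22
--
-- def isUpperLeftAndRightDiagonalsAvailable(row, col, chessboard):
--     # Test upper left diagonal
--     for i, j in zip(range(row, -1, -1), range(col, -1, -1)):
--         if chessboard[i][j] != 0:
--             return False
--     # Test upper right diagonal
--     for i, j in zip(range(row, -1, -1), range(col, CHESSBOARD_SIZE, 1)):
--         if chessboard[i][j] != 0:
--             return False
--     return True
-- ===== SOURCE B (Python) =====
-- CHESSBOARD_SIZE = 22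
--
-- def isUpperLeftAndRightDiagonalsAvailable(row, col, chessboard):
--     d = 0
--     while row - d >= 0 and (col - d >= 0 or col + d < CHESSBOARD_SIZE):
--         if col - d >= 0 and chessboard[row - d][col - d] != 0:
--             return False
--         if col + d < CHESSBOARD_SIZE and chessboard[row - d][col + d] != 0:
--             return False
--         d += 1
--     return True
-- ===== Notes on version B (the rewrite author's own statement) =====
-- stated objective: alternative
-- what changed: The two separate zipped-range diagonal scans are fused into one distance-indexed while-loop over a single offset d that checks the upper-left cell (when col-d >= 0) and the upper-right cell (when col+d < CHESSBOARD_SIZE) in the same pass.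
-- outside the precondition, e.g. on isUpperLeftAndRightDiagonalsAvailable(2, 2, [[1], [0, 0, 0], [0, 0, 0]]): A returns False, B raises IndexError; on isUpperLeftAndRightDiagonalsAvailable(1, 1, [[7], [0, 0]]): A returns False, B returns False
import Mathlib
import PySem

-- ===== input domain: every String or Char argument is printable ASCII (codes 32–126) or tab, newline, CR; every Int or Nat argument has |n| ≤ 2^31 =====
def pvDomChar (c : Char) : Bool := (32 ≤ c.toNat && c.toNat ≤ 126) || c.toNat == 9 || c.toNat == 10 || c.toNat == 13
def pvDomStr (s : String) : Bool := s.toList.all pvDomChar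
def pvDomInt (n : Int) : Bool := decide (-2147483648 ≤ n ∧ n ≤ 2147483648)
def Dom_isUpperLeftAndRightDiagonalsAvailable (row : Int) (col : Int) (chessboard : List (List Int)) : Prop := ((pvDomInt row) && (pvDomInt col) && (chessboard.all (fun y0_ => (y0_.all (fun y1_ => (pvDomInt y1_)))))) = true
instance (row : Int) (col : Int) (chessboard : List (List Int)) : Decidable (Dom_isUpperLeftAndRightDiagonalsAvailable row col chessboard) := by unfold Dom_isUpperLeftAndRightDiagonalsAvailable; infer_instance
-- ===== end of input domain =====

-- B fuses A's two zipped-range diagonal scans into one distance-indexed loop checking both diagonals per step (alternative decomposition, same cost).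


-- ===== PORT A =====
-- chessboard[i][j] with Python index semantics; the .getD defaults are only hit
-- where Python raises IndexError, which Pre_ excludes.
def pvCell (chessboard : List (List Int)) (i j : Int) : Int :=
  (PySem.List.pyGet? ((PySem.List.pyGet? chessboard i).getD []) j).getD 0

-- 'for i, j in zip(range(row,-1,-1), range(col,-1,-1)): if chessboard[i][j] != 0: return False'
-- ported as Python executes it lazily: step (i,j) down in lockstep; the Nat fuel is exactly
-- the length of range(row,-1,-1) (the 'i > -1' bound), the 'j > -1' bound is the explicit guard.
def pvLeftScan (chessboard : List (List Int)) : Int → Int → Nat → Bool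
  | _, _, 0 => true
  | i, j, fuel + 1 =>
    if -1 < j then
      if pvCell chessboard i j != 0 then false
      else pvLeftScan chessboard (i - 1) (j - 1) fuel
    else true

-- 'for i, j in zip(range(row,-1,-1), range(col, CHESSBOARD_SIZE, 1)): …', same convention,
-- with the 'j < 22' bound of range(col, 22, 1) as the explicit guard.
def pvRightScan (chessboard : List (List Int)) : Int → Int → Nat → Bool
  | _, _, 0 => true
  | i, j, fuel + 1 =>
    if j < 22 then
      if pvCell chessboard i j != 0 then false
      else pvRightScan chessboard (i - 1) (j + 1) fuel
    else true

def isUpperLeftAndRightDiagonalsAvailable (row : Int) (col : Int) (chessboard : List (List Int)) : Bool :=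
  -- Test upper left diagonal
  if pvLeftScan chessboard row col (row + 1).toNat = false then false
  -- Test upper right diagonal
  else if pvRightScan chessboard row col (row + 1).toNat = false then false
  else true

-- ===== PORT B =====
-- the while-loop of Source B, one step per offset d; the Nat fuel is exactly the
-- 'row - d >= 0' part of the loop condition, the col part is the explicit guard.
def pvBLoop (row col : Int) (chessboard : List (List Int)) : Int → Nat → Bool
  | _, 0 => true
  | d, fuel + 1 =>
    if 0 ≤ col - d ∨ col + d < 22 then
      if 0 ≤ col - d ∧ pvCell chessboard (row - d) (col - d) ≠ 0 then false
      else if col + d < 22 ∧ pvCell chessboard (row - d) (col + d) ≠ 0 then false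
      else pvBLoop row col chessboard (d + 1) fuel
    else true

def isUpperLeftAndRightDiagonalsAvailable_alt (row : Int) (col : Int) (chessboard : List (List Int)) : Bool :=
  pvBLoop row col chessboard 0 (row + 1).toNat

-- ===== PRECONDITION & SPEC =====
-- length of chessboard[i] under Python index semantics (0 for an out-of-range i)
def pvRowLen (chessboard : List (List Int)) (i : Int) : Int :=
  ((PySem.List.pyGet? chessboard i).getD []).length

-- Pre_ admits exactly the inputs whose two diagonal scans only touch cells inside the board
-- (Python's negative-index wraparound included); outside it A raises IndexError, except on a few
-- boards where a nonzero cell ends a scan just before the out-of-range access — an accident of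
-- A's scan order that B's fused scan order does not always share.
def Pre_isUpperLeftAndRightDiagonalsAvailable (row : Int) (col : Int) (chessboard : List (List Int)) : Prop :=
  row < 0 ∨ (row < chessboard.length ∧
    ∀ k : Nat, k < (row + 1).toNat →
      ((k : Int) ≤ col →
        -(pvRowLen chessboard (row - k)) ≤ col - k ∧ col - k < pvRowLen chessboard (row - k)) ∧
      (col + (k : Int) < 22 →
        -(pvRowLen chessboard (row - k)) ≤ col + k ∧ col + k < pvRowLen chessboard (row - k)))
instance (row : Int) (col : Int) (chessboard : List (List Int)) : Decidable (Pre_isUpperLeftAndRightDiagonalsAvailable row col chessboard) := by unfold Pre_isUpperLeftAndRightDiagonalsAvailable; infer_instance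

def pvWitness_isUpperLeftAndRightDiagonalsAvailable : Int × Int × List (List Int) :=
  (1, 1, [[0,0,0,0,0,0,0,0,0,0,0,0,0,0,0,0,0,0,0,0,0,0], [0,0,0,0,0,0,0,0,0,0,0,0,0,0,0,0,0,0,0,0,0,0]])

def Spec_isUpperLeftAndRightDiagonalsAvailable (row : Int) (col : Int) (chessboard : List (List Int)) (out : Bool) : Prop := out = isUpperLeftAndRightDiagonalsAvailable_alt row col chessboard
instance (row : Int) (col : Int) (chessboard : List (List Int)) (out : Bool) : Decidable (Spec_isUpperLeftAndRightDiagonalsAvailable row col chessboard out) := by unfold Spec_isUpperLeftAndRightDiagonalsAvailable; infer_instance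

-- ===== CLAIM (what is proved, stated in full; the proofs are below) =====
def Claim_equal_isUpperLeftAndRightDiagonalsAvailable : Prop := ∀ (row : Int) (col : Int) (chessboard : List (List Int)), Dom_isUpperLeftAndRightDiagonalsAvailable row col chessboard → Pre_isUpperLeftAndRightDiagonalsAvailable row col chessboard → Spec_isUpperLeftAndRightDiagonalsAvailable row col chessboard (isUpperLeftAndRightDiagonalsAvailable row col chessboard)

-- ===== LEMMAS AND PROOFS =====

theorem pvLeftScan_iff (chessboard : List (List Int)) (fuel : Nat) :
    ∀ (i j : Int), (pvLeftScan chessboard i j fuel = true ↔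
      ∀ k : Nat, k < min fuel (j + 1).toNat → pvCell chessboard (i - k) (j - k) = 0) := by
  induction fuel with
  | zero => intro i j; simp [pvLeftScan]
  | succ fuel ih =>
      intro i j
      rw [pvLeftScan]
      by_cases hj : -1 < j
      · rw [if_pos hj]
        by_cases hc : pvCell chessboard i j = 0
        · rw [if_neg (show ¬ (pvCell chessboard i j != 0) = true by simpa using hc), ih]
          constructor
          · intro hall k hk
            match k with
            | 0 => simpa using hc
            | k + 1 =>
                have := hall k (by omega)
                have e1 : i - 1 - (k : Int) = i - ((k : Nat) + 1 : Nat) := by push_cast; ring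
                have e2 : j - 1 - (k : Int) = j - ((k : Nat) + 1 : Nat) := by push_cast; ring
                rwa [e1, e2] at this
          · intro hall k hk
            have := hall (k + 1) (by omega)
            have e1 : i - ((k : Nat) + 1 : Nat) = i - 1 - (k : Int) := by push_cast; ring
            have e2 : j - ((k : Nat) + 1 : Nat) = j - 1 - (k : Int) := by push_cast; ring
            rwa [e1, e2] at this
        · rw [if_pos (show (pvCell chessboard i j != 0) = true by simpa using hc)]
          simp only [Bool.false_eq_true, false_iff, not_forall]
          exact ⟨0, by omega, by simpa using hc⟩
      · rw [if_neg hj]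
        have : min (fuel + 1) (j + 1).toNat = 0 := by omega
        simp [this]

theorem pvRightScan_iff (chessboard : List (List Int)) (fuel : Nat) :
    ∀ (i j : Int), (pvRightScan chessboard i j fuel = true ↔
      ∀ k : Nat, k < min fuel (22 - j).toNat → pvCell chessboard (i - k) (j + k) = 0) := by
  induction fuel with
  | zero => intro i j; simp [pvRightScan]
  | succ fuel ih =>
      intro i j
      rw [pvRightScan]
      by_cases hj : j < 22
      · rw [if_pos hj]
        by_cases hc : pvCell chessboard i j = 0
        · rw [if_neg (show ¬ (pvCell chessboard i j != 0) = true by simpa using hc), ih]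
          constructor
          · intro hall k hk
            match k with
            | 0 => simpa using hc
            | k + 1 =>
                have := hall k (by omega)
                have e1 : i - 1 - (k : Int) = i - ((k : Nat) + 1 : Nat) := by push_cast; ring
                have e2 : j + 1 + (k : Int) = j + ((k : Nat) + 1 : Nat) := by push_cast; ring
                rwa [e1, e2] at this
          · intro hall k hk
            have := hall (k + 1) (by omega)
            have e1 : i - ((k : Nat) + 1 : Nat) = i - 1 - (k : Int) := by push_cast; ring
            have e2 : j + ((k : Nat) + 1 : Nat) = j + 1 + (k : Int) := by push_cast; ring
            rwa [e1, e2] at this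
        · rw [if_pos (show (pvCell chessboard i j != 0) = true by simpa using hc)]
          simp only [Bool.false_eq_true, false_iff, not_forall]
          exact ⟨0, by omega, by simpa using hc⟩
      · rw [if_neg hj]
        have : min (fuel + 1) (22 - j).toNat = 0 := by omega
        simp [this]

theorem pvBLoop_iff (row col : Int) (chessboard : List (List Int)) (fuel : Nat) :
    ∀ (d : Int), (pvBLoop row col chessboard d fuel = true ↔
      ∀ k : Nat, k < fuel →
        (0 ≤ col - (d + k) → pvCell chessboard (row - (d + k)) (col - (d + k)) = 0) ∧
        (col + (d + k) < 22 → pvCell chessboard (row - (d + k)) (col + (d + k)) = 0)) := by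
  induction fuel with
  | zero => intro d; simp [pvBLoop]
  | succ fuel ih =>
      intro d
      rw [pvBLoop]
      by_cases hg : 0 ≤ col - d ∨ col + d < 22
      · rw [if_pos hg]
        by_cases h1 : 0 ≤ col - d ∧ pvCell chessboard (row - d) (col - d) ≠ 0
        · rw [if_pos h1]
          simp only [Bool.false_eq_true, false_iff, not_forall]
          refine ⟨0, by omega, ?_⟩
          intro hP
          have := hP.1 (by push_cast; omega)
          rw [show col - (d + (0 : Nat)) = col - d by push_cast; ring,
              show row - (d + (0 : Nat)) = row - d by push_cast; ring] at this
          exact h1.2 this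
        · rw [if_neg h1]
          by_cases h2 : col + d < 22 ∧ pvCell chessboard (row - d) (col + d) ≠ 0
          · rw [if_pos h2]
            simp only [Bool.false_eq_true, false_iff, not_forall]
            refine ⟨0, by omega, ?_⟩
            intro hP
            have := hP.2 (by push_cast; omega)
            rw [show col + (d + (0 : Nat)) = col + d by push_cast; ring,
                show row - (d + (0 : Nat)) = row - d by push_cast; ring] at this
            exact h2.2 this
          · rw [if_neg h2, ih]
            push Not at h1 h2
            constructor
            · intro hall k hk
              match k with
              | 0 =>
                  rw [show (d + ((0 : Nat) : Int)) = d by push_cast; ring]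
                  exact ⟨h1, h2⟩
              | k + 1 =>
                  have := hall k (by omega)
                  have e : d + 1 + (k : Int) = d + ((k : Nat) + 1 : Nat) := by push_cast; ring
                  rwa [e] at this
            · intro hall k hk
              have := hall (k + 1) (by omega)
              have e : d + ((k : Nat) + 1 : Nat) = d + 1 + (k : Int) := by push_cast; ring
              rwa [e] at this
      · rw [if_neg hg]
        push Not at hg
        simp only [true_iff]
        intro k hk
        constructor
        · intro hc; exfalso; omega
        · intro hc; exfalso; omega

theorem portA_eq_portB (row col : Int) (chessboard : List (List Int)) :
    isUpperLeftAndRightDiagonalsAvailable row col chessboard =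
      isUpperLeftAndRightDiagonalsAvailable_alt row col chessboard := by
  unfold isUpperLeftAndRightDiagonalsAvailable isUpperLeftAndRightDiagonalsAvailable_alt
  rw [Bool.eq_iff_iff]
  constructor
  · intro h
    by_cases hL : pvLeftScan chessboard row col (row + 1).toNat = false
    · rw [if_pos hL] at h; exact absurd h (by simp)
    · rw [if_neg hL] at h
      by_cases hR : pvRightScan chessboard row col (row + 1).toNat = false
      · rw [if_pos hR] at h; exact absurd h (by simp)
      · rw [Bool.not_eq_false] at hL hR
        rw [pvLeftScan_iff] at hL
        rw [pvRightScan_iff] at hR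
        rw [pvBLoop_iff]
        intro k hk
        constructor
        · intro hc
          have := hL k (by omega)
          rwa [show row - (k : Int) = row - ((0 : Int) + k) by ring,
               show col - (k : Int) = col - ((0 : Int) + k) by ring] at this
        · intro hc
          have := hR k (by omega)
          rwa [show row - (k : Int) = row - ((0 : Int) + k) by ring,
               show col + (k : Int) = col + ((0 : Int) + k) by ring] at this
  · intro h
    rw [pvBLoop_iff] at h
    rw [if_neg, if_neg]
    · rw [Bool.not_eq_false, pvRightScan_iff]
      intro k hk
      have := (h k (by omega)).2 (by omega)
      rwa [show row - ((0 : Int) + k) = row - (k : Int) by ring,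
           show col + ((0 : Int) + k) = col + (k : Int) by ring] at this
    · rw [Bool.not_eq_false, pvLeftScan_iff]
      intro k hk
      have := (h k (by omega)).1 (by omega)
      rwa [show row - ((0 : Int) + k) = row - (k : Int) by ring,
           show col - ((0 : Int) + k) = col - (k : Int) by ring] at this

-- ===== VERDICT (by name: the statement is the Claim_ definition above) =====
theorem isUpperLeftAndRightDiagonalsAvailable_spec : Claim_equal_isUpperLeftAndRightDiagonalsAvailable := by
  intro row col chessboard _ _
  exact portA_eq_portB row col chessboard
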